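-- pv_equiv track=rewrite | github.com/dkfmaekdnjfk/Psionics | wiki/scripts/fsrs_scheduler.py | build_mixed_order
-- ===== SOURCE A (Python) =====
-- MIX_DUE_PER_BLOCK = 2     # 혼합 진행 시 블록당 due 개수
--
-- MIX_NEW_PER_BLOCK = 1     # 혼합 진행 시 블록당 new 개수
--
-- def build_mixed_order(due_pages: list[dict], new_today: list[dict]) -> list[tuple[str, dict]]:
--     """
--     복습 편향을 줄이기 위해 due/new를 블록 단위로 교차 배치한다.
--     기본: due 2개 + new 1개 반복.
--     반환: [("due", page_dict), ("new", page_dict), ...]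
--     """
--     mixed: list[tuple[str, dict]] = []
--     i_due = 0
--     i_new = 0
--     n_due = len(due_pages)
--     n_new = len(new_today)
--
--     while i_due < n_due or i_new < n_new:
--         for _ in range(MIX_DUE_PER_BLOCK):
--             if i_due < n_due:
--                 mixed.append(("due", due_pages[i_due]))
--                 i_due += 1
--         for _ in range(MIX_NEW_PER_BLOCK):
--             if i_new < n_new:
--                 mixed.append(("new", new_today[i_new]))
--                 i_new += 1
--     return mixed
-- ===== SOURCE B (Python) =====
-- def build_mixed_order(due_pages: list[dict], new_today: list[dict]) -> list[tuple[str, dict]]: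
--     # Decorate-sort-undecorate: each item gets the virtual slot it would occupy in an
--     # infinite 2:2:1 schedule (due i -> 3*i//2, new j -> 3*j+2); a stable sort on the
--     # distinct slot numbers closes the gaps left by the shorter list exactly as A's
--     # guarded appends do.
--     tagged = [(3 * i // 2, ("due", p)) for i, p in enumerate(due_pages)]
--     tagged += [(3 * j + 2, ("new", p)) for j, p in enumerate(new_today)]
--     tagged.sort(key=lambda t: t[0])
--     return [item for _, item in tagged]
-- ===== Notes on version B (the rewrite author's own statement) =====
-- stated objective: alternative
-- what changed: Instead of consuming the two lists with a loop, B assigns every item the virtual slot it would occupy in an infinite 2-due/1-new schedule (due i -> 3*i//2, new j -> 3*j+2), concatenates the tagged lists, sorts once by slot number, and strips the tags; the distinct slot keys make the sort reproduce A's truncating interleave.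
import Mathlib
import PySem

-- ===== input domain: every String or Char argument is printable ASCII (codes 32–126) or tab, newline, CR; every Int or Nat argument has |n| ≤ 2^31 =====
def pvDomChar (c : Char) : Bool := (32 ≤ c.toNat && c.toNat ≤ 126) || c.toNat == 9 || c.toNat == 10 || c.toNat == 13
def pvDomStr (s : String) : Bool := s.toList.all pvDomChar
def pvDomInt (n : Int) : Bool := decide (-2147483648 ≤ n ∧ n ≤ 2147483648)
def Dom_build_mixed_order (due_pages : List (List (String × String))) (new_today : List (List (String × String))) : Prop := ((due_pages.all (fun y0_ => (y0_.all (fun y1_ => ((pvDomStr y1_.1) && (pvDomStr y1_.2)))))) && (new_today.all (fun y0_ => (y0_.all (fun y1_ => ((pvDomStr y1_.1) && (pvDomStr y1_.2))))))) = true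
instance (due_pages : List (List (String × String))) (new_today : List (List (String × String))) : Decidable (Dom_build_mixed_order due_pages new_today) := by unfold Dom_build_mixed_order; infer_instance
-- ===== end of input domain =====

-- B replaces A's cursor loop by decorate-sort-undecorate: tag each item with its virtual
-- slot in an infinite 2:1 schedule, sort once by slot, strip the tags (objective: alternative).

-- ===== PORT A =====
-- A's while-loop: state = (mixed, i_due, i_new); the two inner for-loops are unrolled
-- (MIX_DUE_PER_BLOCK = 2, MIX_NEW_PER_BLOCK = 1), each guarded append + increment kept.
def bmoLoop {α : Type} (due_pages new_today : List α) (mixed : List (String × α))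
    (i_due i_new : Nat) : List (String × α) :=
  if i_due < due_pages.length ∨ i_new < new_today.length then
    let a1 := if h : i_due < due_pages.length then mixed ++ [("due", due_pages[i_due])] else mixed
    let d1 := if i_due < due_pages.length then i_due + 1 else i_due
    let a2 := if h : d1 < due_pages.length then a1 ++ [("due", due_pages[d1])] else a1
    let d2 := if d1 < due_pages.length then d1 + 1 else d1
    let a3 := if h : i_new < new_today.length then a2 ++ [("new", new_today[i_new])] else a2
    let n1 := if i_new < new_today.length then i_new + 1 else i_new
    bmoLoop due_pages new_today a3 d2 n1
  else
    mixed
termination_by (due_pages.length - i_due) + (new_today.length - i_new)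
decreasing_by
  split_ifs <;> omega

def build_mixed_order (due_pages : List (List (String × String))) (new_today : List (List (String × String))) : List (String × (List (String × String))) :=
  bmoLoop due_pages new_today [] 0 0

-- ===== PORT B =====
-- Source B: tagged = [(3*i//2, ("due", p)) for i, p in enumerate(due_pages)]
--       tagged += [(3*j+2, ("new", p)) for j, p in enumerate(new_today)]
--       tagged.sort(key=lambda t: t[0]); return [item for _, item in tagged]
def build_mixed_order_alt (due_pages : List (List (String × String))) (new_today : List (List (String × String))) : List (String × (List (String × String))) :=
  (PySem.List.sorted
      ((PySem.List.enumerate due_pages 0).map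
          (fun ip => (PySem.Int.floordiv (3 * ip.1) 2, (("due", ip.2) : String × List (String × String))))
        ++ (PySem.List.enumerate new_today 0).map
          (fun jp => (3 * jp.1 + 2, (("new", jp.2) : String × List (String × String)))))
      (fun t => t.1) false).map (fun t => t.2)

-- ===== PRECONDITION & SPEC =====
def Spec_build_mixed_order (due_pages : List (List (String × String))) (new_today : List (List (String × String))) (out : List (String × (List (String × String)))) : Prop := out = build_mixed_order_alt due_pages new_today
instance (due_pages : List (List (String × String))) (new_today : List (List (String × String))) (out : List (String × (List (String × String)))) : Decidable (Spec_build_mixed_order due_pages new_today out) := by unfold Spec_build_mixed_order; infer_instance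

-- ===== CLAIM (what is proved, stated in full; the proofs are below) =====
def Claim_equal_build_mixed_order : Prop := ∀ (due_pages : List (List (String × String))) (new_today : List (List (String × String))), Dom_build_mixed_order due_pages new_today → Spec_build_mixed_order due_pages new_today (build_mixed_order due_pages new_today)

-- ===== LEMMAS AND PROOFS =====

-- canonical block recursion both ports are reduced to
def pvG {α : Type} (d n : List α) : List (String × α) :=
  if d = [] ∧ n = [] then []
  else ((d.take 2).map (fun p => ("due", p)) ++ (n.take 1).map (fun p => ("new", p)))
        ++ pvG (d.drop 2) (n.drop 1)
termination_by d.length + n.length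
decreasing_by
  rename_i h
  rcases d with _ | ⟨x, d⟩ <;> rcases n with _ | ⟨y, n⟩ <;> (simp_all; try omega)

lemma pvG_nil_nil {α : Type} : pvG ([] : List α) [] = [] := by rw [pvG]; simp

lemma pvG_cc {α : Type} (x y z : α) (d n : List α) :
    pvG (x :: y :: d) (z :: n) = ("due", x) :: ("due", y) :: ("new", z) :: pvG d n := by
  rw [pvG]; simp

lemma pvG_cc0 {α : Type} (x y : α) (d : List α) :
    pvG (x :: y :: d) [] = ("due", x) :: ("due", y) :: pvG d [] := by
  rw [pvG]; simp

lemma pvG_1c {α : Type} (x z : α) (n : List α) :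
    pvG [x] (z :: n) = ("due", x) :: ("new", z) :: pvG [] n := by
  rw [pvG]; simp

lemma pvG_10 {α : Type} (x : α) : pvG [x] ([] : List α) = [("due", x)] := by
  rw [pvG]; simp [pvG_nil_nil]

lemma pvG_0c {α : Type} (z : α) (n : List α) :
    pvG ([] : List α) (z :: n) = ("new", z) :: pvG [] n := by
  rw [pvG]; simp

lemma bmoLoop_eq_pvG {α : Type} (due new : List α) (i_due i_new : Nat) (acc : List (String × α)) :
      bmoLoop due new acc i_due i_new = acc ++ pvG (due.drop i_due) (new.drop i_new) := by
  fun_induction bmoLoop due new acc i_due i_new with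
  | case1 acc i_due i_new hguard a1 d1 a2 d2 a3 n1 ih =>
    simp only [a1, d1, a2, d2, a3, n1] at ih ⊢
    rw [ih]
    rcases Nat.lt_or_ge i_due due.length with hd | hd <;>
      rcases Nat.lt_or_ge i_new new.length with hn | hn
    · by_cases hd2 : i_due + 1 < due.length
      · rw [List.drop_eq_getElem_cons hd, List.drop_eq_getElem_cons hd2,
            List.drop_eq_getElem_cons hn, pvG_cc]
        simp only [dif_pos hd, dif_pos hd2, dif_pos hn]
        simp [List.append_assoc]
      · have hnil : List.drop (i_due + 1) due = [] := List.drop_eq_nil_of_le (by omega)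
        rw [List.drop_eq_getElem_cons hd, hnil, List.drop_eq_getElem_cons hn, pvG_1c]
        simp only [dif_pos hd, dif_neg hd2, dif_pos hn]
        rw [List.drop_eq_nil_of_le (as := due) (by omega)]
        simp [List.append_assoc]
    · by_cases hd2 : i_due + 1 < due.length
      · have hnnil : List.drop i_new new = [] := List.drop_eq_nil_of_le (by omega)
        rw [List.drop_eq_getElem_cons hd, List.drop_eq_getElem_cons hd2, hnnil, pvG_cc0]
        simp only [dif_pos hd, dif_pos hd2, dif_neg (by omega : ¬ i_new < new.length)]
        rw [show List.drop i_new new = [] from hnnil]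
        simp [List.append_assoc]
      · have hnil : List.drop (i_due + 1) due = [] := List.drop_eq_nil_of_le (by omega)
        have hnnil : List.drop i_new new = [] := List.drop_eq_nil_of_le (by omega)
        rw [List.drop_eq_getElem_cons hd, hnil, hnnil, pvG_10]
        simp only [dif_pos hd, dif_neg hd2, dif_neg (by omega : ¬ i_new < new.length)]
        rw [List.drop_eq_nil_of_le (as := due) (by omega), hnnil]
        simp [pvG_nil_nil]
    · have hdnil : List.drop i_due due = [] := List.drop_eq_nil_of_le (by omega)
      rw [hdnil, List.drop_eq_getElem_cons hn, pvG_0c]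
      simp only [dif_neg (by omega : ¬ i_due < due.length), dif_pos hn]
      rw [List.drop_eq_nil_of_le (as := due) (by omega)]
      simp [List.append_assoc]
    · omega
  | case2 acc i_due i_new hguard =>
    rw [List.drop_eq_nil_of_le (by omega), List.drop_eq_nil_of_le (by omega), pvG_nil_nil]
    simp

-- the keyed interleave: pvG decorated with the slot numbers B assigns, blocks numbered from b
def pvK {α : Type} (b : Nat) : List α → List α → List (Int × (String × α))
  | [], [] => []
  | [], z :: n => (3 * (b : Int) + 2, ("new", z)) :: pvK (b + 1) [] n
  | [x], [] => [(3 * (b : Int), ("due", x))]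
  | [x], z :: n => (3 * (b : Int), ("due", x)) :: (3 * (b : Int) + 2, ("new", z)) :: pvK (b + 1) [] n
  | x :: y :: d, [] => (3 * (b : Int), ("due", x)) :: (3 * (b : Int) + 1, ("due", y)) :: pvK (b + 1) d []
  | x :: y :: d, z :: n =>
      (3 * (b : Int), ("due", x)) :: (3 * (b : Int) + 1, ("due", y)) :: (3 * (b : Int) + 2, ("new", z))
        :: pvK (b + 1) d n
termination_by d n => d.length + n.length

lemma pvK_map_snd {α : Type} (b : Nat) (d n : List α) :
    (pvK b d n).map (fun t => t.2) = pvG d n := by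
  fun_induction pvK b d n with
  | case1 b => simp [pvK, pvG_nil_nil]
  | case2 b z n ih => simp [pvK, pvG_0c, ih]
  | case3 b x => simp [pvK, pvG_10]
  | case4 b x z n ih => simp [pvK, pvG_1c, ih]
  | case5 b x y d ih => simp [pvK, pvG_cc0, ih]
  | case6 b x y d z n ih => simp [pvK, pvG_cc, ih]

lemma pvK_key_lb {α : Type} (b : Nat) (d n : List α) :
    ∀ p ∈ pvK b d n, 3 * (b : Int) ≤ p.1 := by
  fun_induction pvK b d n with
  | case1 b => simp [pvK]
  | case2 b z n ih =>
    intro p hp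
    simp only [pvK, List.mem_cons] at hp
    rcases hp with h | h
    · subst h; omega
    · have := ih p h; push_cast at this ⊢; omega
  | case3 b x => intro p hp; simp only [pvK, List.mem_singleton] at hp; subst hp; omega
  | case4 b x z n ih =>
    intro p hp
    simp only [pvK, List.mem_cons] at hp
    rcases hp with h | h | h
    · subst h; omega
    · subst h; omega
    · have := ih p h; push_cast at this ⊢; omega
  | case5 b x y d ih =>
    intro p hp
    simp only [pvK, List.mem_cons] at hp
    rcases hp with h | h | h
    · subst h; omega
    · subst h; omega
    · have := ih p h; push_cast at this ⊢; omega
  | case6 b x y d z n ih =>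
    intro p hp
    simp only [pvK, List.mem_cons] at hp
    rcases hp with h | h | h | h
    · subst h; omega
    · subst h; omega
    · subst h; omega
    · have := ih p h; push_cast at this ⊢; omega

lemma pvK_pairwise {α : Type} (b : Nat) (d n : List α) :
    (pvK b d n).Pairwise (fun p q => p.1 < q.1) := by
  fun_induction pvK b d n with
  | case1 b => simp [pvK]
  | case2 b z n ih =>
    refine List.Pairwise.cons ?_ ih
    intro q hq; have := pvK_key_lb (b + 1) ([] : List α) n q hq; push_cast at this ⊢; omega
  | case3 b x => simp [pvK]
  | case4 b x z n ih =>
    refine List.Pairwise.cons ?_ (List.Pairwise.cons ?_ ih)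
    · intro q hq
      simp only [List.mem_cons] at hq
      rcases hq with h | h
      · subst h; omega
      · have := pvK_key_lb (b + 1) ([] : List α) n q h; push_cast at this ⊢; omega
    · intro q hq; have := pvK_key_lb (b + 1) ([] : List α) n q hq; push_cast at this ⊢; omega
  | case5 b x y d ih =>
    refine List.Pairwise.cons ?_ (List.Pairwise.cons ?_ ih)
    · intro q hq
      simp only [List.mem_cons] at hq
      rcases hq with h | h
      · subst h; omega
      · have := pvK_key_lb (b + 1) d ([] : List α) q h; push_cast at this ⊢; omega
    · intro q hq; have := pvK_key_lb (b + 1) d ([] : List α) q hq; push_cast at this ⊢; omega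
  | case6 b x y d z n ih =>
    refine List.Pairwise.cons ?_ (List.Pairwise.cons ?_ (List.Pairwise.cons ?_ ih))
    · intro q hq
      simp only [List.mem_cons] at hq
      rcases hq with h | h | h
      · subst h; omega
      · subst h; omega
      · have := pvK_key_lb (b + 1) d n q h; push_cast at this ⊢; omega
    · intro q hq
      simp only [List.mem_cons] at hq
      rcases hq with h | h
      · subst h; omega
      · have := pvK_key_lb (b + 1) d n q h; push_cast at this ⊢; omega
    · intro q hq; have := pvK_key_lb (b + 1) d n q hq; push_cast at this ⊢; omega

-- the two tagged comprehensions of Source B, with the enumerate starts generalised per block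
def pvDueTags {α : Type} (b : Nat) (d : List α) : List (Int × (String × α)) :=
  (PySem.List.enumerate d (2 * (b : Int))).map
    (fun ip => (PySem.Int.floordiv (3 * ip.1) 2, (("due", ip.2) : String × α)))

def pvNewTags {α : Type} (b : Nat) (n : List α) : List (Int × (String × α)) :=
  (PySem.List.enumerate n (b : Int)).map
    (fun jp => (3 * jp.1 + 2, (("new", jp.2) : String × α)))

lemma pvFloordiv_even (b : Nat) : PySem.Int.floordiv (3 * (2 * (b : Int))) 2 = 3 * (b : Int) := by
  have h : (3 * (2 * (b : Int))) = ((6 * b : Nat) : Int) := by push_cast; ring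
  rw [h, show ((2 : Int)) = ((2 : Nat) : Int) from rfl, PySem.Int.floordiv_natCast]
  have h2 : (6 * b) / 2 = 3 * b := by omega
  rw [h2]
  push_cast; ring

lemma pvFloordiv_odd (b : Nat) :
    PySem.Int.floordiv (3 * (2 * (b : Int) + 1)) 2 = 3 * (b : Int) + 1 := by
  have h : (3 * (2 * (b : Int) + 1)) = ((6 * b + 3 : Nat) : Int) := by push_cast; ring
  rw [h, show ((2 : Int)) = ((2 : Nat) : Int) from rfl, PySem.Int.floordiv_natCast]
  have h2 : (6 * b + 3) / 2 = 3 * b + 1 := by omega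
  rw [h2]
  push_cast; ring

lemma pvDueTags_cons2 {α : Type} (b : Nat) (x y : α) (d : List α) :
    pvDueTags b (x :: y :: d)
      = (3 * (b : Int), ("due", x)) :: (3 * (b : Int) + 1, ("due", y)) :: pvDueTags (b + 1) d := by
  have h2 : (2 * (b : Int) + 1 + 1) = 2 * (((b + 1 : Nat)) : Int) := by push_cast; ring
  simp only [pvDueTags, PySem.List.enumerate_cons, List.map_cons]
  rw [pvFloordiv_even, pvFloordiv_odd, h2]

lemma pvNewTags_cons {α : Type} (b : Nat) (z : α) (n : List α) :
    pvNewTags b (z :: n) = (3 * (b : Int) + 2, ("new", z)) :: pvNewTags (b + 1) n := by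
  have h1 : ((b : Int) + 1) = (((b + 1 : Nat)) : Int) := by push_cast; ring
  simp only [pvNewTags, PySem.List.enumerate_cons, List.map_cons]
  rw [h1]

lemma pvTags_perm_pvK {α : Type} (b : Nat) (d n : List α) :
    (pvDueTags b d ++ pvNewTags b n).Perm (pvK b d n) := by
  fun_induction pvK b d n with
  | case1 b => simp [pvDueTags, pvNewTags, pvK, PySem.List.enumerate_nil]
  | case2 b z n ih =>
    simp only [pvDueTags, PySem.List.enumerate_nil, List.map_nil, List.nil_append,
      pvNewTags_cons, pvK] at ih ⊢
    exact (List.Perm.cons _ (by simpa [pvDueTags, PySem.List.enumerate_nil] using ih))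
  | case3 b x =>
    simp [pvDueTags, pvNewTags, PySem.List.enumerate_cons, PySem.List.enumerate_nil]
    omega
  | case4 b x z n ih =>
    simp only [pvNewTags_cons, pvK] at ih ⊢
    have hd : pvDueTags b [x] = [(3 * (b : Int), ("due", x))] := by
      simp [pvDueTags, PySem.List.enumerate_cons, PySem.List.enumerate_nil]
      omega
    rw [hd]
    simp only [List.cons_append, List.nil_append]
    exact (List.Perm.cons _ (List.Perm.cons _
      (by simpa [pvDueTags, PySem.List.enumerate_nil] using ih)))
  | case5 b x y d ih =>
    simp only [pvDueTags_cons2, pvK] at ih ⊢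
    simp only [pvNewTags, PySem.List.enumerate_nil, List.map_nil, List.append_nil] at ih ⊢
    exact (List.Perm.cons _ (List.Perm.cons _ ih))
  | case6 b x y d z n ih =>
    rw [pvDueTags_cons2, pvNewTags_cons]
    simp only [pvK, List.cons_append]
    refine (List.Perm.cons _ (List.Perm.cons _ ?_))
    exact List.perm_middle.trans (List.Perm.cons _ ih)

lemma alt_eq_pvG (due new : List (List (String × String))) :
    build_mixed_order_alt due new = pvG due new := by
  unfold build_mixed_order_alt
  have htag : ((PySem.List.enumerate due 0).map
        (fun ip => (PySem.Int.floordiv (3 * ip.1) 2, (("due", ip.2) : String × List (String × String))))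
      ++ (PySem.List.enumerate new 0).map
        (fun jp => (3 * jp.1 + 2, (("new", jp.2) : String × List (String × String)))))
      = pvDueTags 0 due ++ pvNewTags 0 new := by
    simp [pvDueTags, pvNewTags]
  rw [htag]
  have hs : PySem.List.sorted (pvDueTags 0 due ++ pvNewTags 0 new)
      (fun t => t.1) false = pvK 0 due new :=
    PySem.List.sorted_eq_of_perm_of_pairwise_lt _ _ (fun t => t.1)
      ((pvTags_perm_pvK 0 due new).symm) (pvK_pairwise 0 due new)
  rw [hs]
  exact pvK_map_snd 0 due new

-- ===== VERDICT (by name: the statement is the Claim_ definition above) =====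
theorem build_mixed_order_spec : Claim_equal_build_mixed_order := by
  intro due new _
  unfold Spec_build_mixed_order build_mixed_order
  rw [bmoLoop_eq_pvG, alt_eq_pvG]
  simp
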